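-- pv_equiv track=rewrite | github.com/kevinyu2/CRE-Chaining-v2 | ACR_Clustering/Cluster_MSA.py | central_star_msa
-- ===== SOURCE A (Python) =====
-- from typing import List, Tuple
--
-- MATCH = 5
--
-- MISMATCH = -1
--
-- GAP = -1
--
-- def central_star_msa(central, others) :
--     aligned_central = central
--     aligned_others = []
--
--     # Keep all alignments aligned to central
--     for seq in others:
--         aligned1, aligned2 = needleman_wunsch(aligned_central, seq)
--
--         # Expand previous alignments to match new alignment
--         if len(aligned_others) == 0:
--             aligned_central = aligned1
--             aligned_others.append(aligned2)
--         else: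
--             # Expand all sequences to match current central alignment
--             aligned_central, aligned1 = needleman_wunsch(aligned_central, aligned1)
--             new_aligned_others = []
--             for old in aligned_others:
--                 _, aligned_old = needleman_wunsch(aligned_central, old)
--                 new_aligned_others.append(aligned_old)
--             _, aligned2 = needleman_wunsch(aligned_central, aligned2)
--
--             aligned_others = new_aligned_others + [aligned2]
--
--     return [aligned_central] + aligned_others
--
-- GAP_CHAR = "-"
--
-- def score(a: str, b: str) -> int:
--     if a == b:
--         return MATCH
--     return MISMATCH
--
-- def needleman_wunsch(seq1: List[str], seq2: List[str]) -> Tuple[List[str], List[str]]: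
--     m, n = len(seq1), len(seq2)
--     dp = [[0] * (n + 1) for _ in range(m + 1)]
--
--     # Init
--     for i in range(m + 1):
--         dp[i][0] = i * GAP
--     for j in range(n + 1):
--         dp[0][j] = j * GAP
--
--     # Fill
--     for i in range(1, m + 1):
--         for j in range(1, n + 1):
--             match = dp[i - 1][j - 1] + score(seq1[i - 1], seq2[j - 1])
--             delete = dp[i - 1][j] + GAP
--             insert = dp[i][j - 1] + GAP
--             dp[i][j] = max(match, delete, insert)
--
--     # Traceback
--     aligned1, aligned2 = [], []
--     i, j = m, n
--     while i > 0 or j > 0: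
--         if i > 0 and j > 0 and dp[i][j] == dp[i-1][j-1] + score(seq1[i-1], seq2[j-1]):
--             aligned1.append(seq1[i-1])
--             aligned2.append(seq2[j-1])
--             i -= 1
--             j -= 1
--         elif i > 0 and dp[i][j] == dp[i-1][j] + GAP:
--             aligned1.append(seq1[i-1])
--             aligned2.append(GAP_CHAR)
--             i -= 1
--         else:
--             aligned1.append(GAP_CHAR)
--             aligned2.append(seq2[j-1])
--             j -= 1
--
--     return aligned1[::-1], aligned2[::-1]
-- ===== SOURCE B (Python) =====
-- # B: Needleman-Wunsch as a single forward DP whose cells carry the partial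
-- # alignment itself (score, aligned1, aligned2), with rolling rows; the whole
-- # traceback phase disappears. Cell choice priority diag > up > left matches
-- # the alignment A's backward walk reconstructs.
--
-- MATCH = 5
-- MISMATCH = -1
-- GAP = -1
-- GAP_CHAR = "-"
--
--
-- def needleman_wunsch(seq1, seq2):
--     n = len(seq2)
--     row = [(0, [], [])]
--     for j in range(1, n + 1):
--         s, a1, a2 = row[j - 1]
--         row.append((s + GAP, a1 + [GAP_CHAR], a2 + [seq2[j - 1]]))
--     for i in range(1, len(seq1) + 1):
--         x = seq1[i - 1]
--         s, a1, a2 = row[0]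
--         new = [(s + GAP, a1 + [x], a2 + [GAP_CHAR])]
--         for j in range(1, n + 1):
--             y = seq2[j - 1]
--             sd = row[j - 1][0] + (MATCH if x == y else MISMATCH)
--             su = row[j][0] + GAP
--             sl = new[j - 1][0] + GAP
--             best = max(sd, su, sl)
--             if best == sd:
--                 c = (best, row[j - 1][1] + [x], row[j - 1][2] + [y])
--             elif best == su:
--                 c = (best, row[j][1] + [x], row[j][2] + [GAP_CHAR])
--             else:
--                 c = (best, new[j - 1][1] + [GAP_CHAR], new[j - 1][2] + [y])
--             new.append(c)
--         row = new
--     return row[n][1], row[n][2]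
--
--
-- def central_star_msa(central, others):
--     aligned_central = central
--     aligned_others = []
--     for seq in others:
--         aligned1, aligned2 = needleman_wunsch(aligned_central, seq)
--         if aligned_others == []:
--             aligned_central = aligned1
--             aligned_others = [aligned2]
--         else:
--             aligned_central, _ = needleman_wunsch(aligned_central, aligned1)
--             new_aligned_others = [needleman_wunsch(aligned_central, old)[1] for old in aligned_others]
--             aligned2 = needleman_wunsch(aligned_central, aligned2)[1]
--             aligned_others = new_aligned_others + [aligned2]
--     return [aligned_central] + aligned_others
-- ===== Notes on version B (the rewrite author's own statement) =====
-- stated objective: alternative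
-- what changed: needleman_wunsch becomes a single forward DP whose rolling-row cells carry the partial alignment itself (score, aligned1, aligned2), so there is no dp table and no traceback phase at all; A instead fills a full score table and then walks it backwards recomputing comparisons
import Mathlib
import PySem

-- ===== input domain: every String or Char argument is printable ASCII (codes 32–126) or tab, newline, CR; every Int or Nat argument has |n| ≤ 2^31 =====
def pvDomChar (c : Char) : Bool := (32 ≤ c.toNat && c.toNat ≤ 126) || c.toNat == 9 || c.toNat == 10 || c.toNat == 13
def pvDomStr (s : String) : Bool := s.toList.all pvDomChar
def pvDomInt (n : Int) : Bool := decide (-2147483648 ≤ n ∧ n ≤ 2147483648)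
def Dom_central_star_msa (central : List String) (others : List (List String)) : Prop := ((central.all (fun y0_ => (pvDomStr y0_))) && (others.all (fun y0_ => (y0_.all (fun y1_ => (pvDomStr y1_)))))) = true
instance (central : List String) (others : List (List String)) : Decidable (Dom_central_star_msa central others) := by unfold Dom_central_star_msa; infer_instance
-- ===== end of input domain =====

-- B replaces A's fill-then-traceback Needleman-Wunsch by a single forward DP whose
-- rolling-row cells carry the partial alignment itself (score, aligned1, aligned2):
-- no dp table is kept and no traceback phase exists; same alignments ('alternative').

-- ===== PORT A =====
def pvScore (a b : String) : Int := if a = b then 5 else -1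

def pvMget (d : List (List Int)) (i j : Nat) : Int := (d.getD i []).getD j 0

-- inner fill loop of A: for j in range(1, n+1), dp[i][j] = max(match, delete, insert)
def pvFillRowA (seq1 seq2 : List String) (prev : List Int) (i n : Nat) : List Int :=
  (List.range' 1 n).foldl
    (fun cur j =>
      let mtch := prev.getD (j-1) 0 + pvScore (seq1.getD (i-1) "") (seq2.getD (j-1) "")
      let del := prev.getD j 0 + (-1)
      let ins := cur.getD (j-1) 0 + (-1)
      cur ++ [max (max mtch del) ins])
    [(i : Int) * (-1)]

-- outer fill loop of A: the dp matrix, row by row (row 0 / column 0 are the GAP borders)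
def pvFillA (seq1 seq2 : List String) (m n : Nat) : List (List Int) :=
  (List.range' 1 m).foldl
    (fun d i => d ++ [pvFillRowA seq1 seq2 (d.getD (i-1) []) i n])
    [(List.range (n+1)).map (fun (j : Nat) => (j : Int) * (-1))]

-- A's traceback while-loop: re-compares dp entries; appends, reversed afterwards.
-- fuel = i + j bounds the iteration count (the Python loop decrements i+j each step).
def pvTraceA (seq1 seq2 : List String) (dp : List (List Int)) :
    Nat → Nat → Nat → List String → List String → List String × List String
  | 0, _, _, a1, a2 => (a1, a2)
  | fuel+1, i, j, a1, a2 =>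
    if i > 0 ∨ j > 0 then
      if i > 0 ∧ j > 0 ∧ pvMget dp i j = pvMget dp (i-1) (j-1) + pvScore (seq1.getD (i-1) "") (seq2.getD (j-1) "") then
        pvTraceA seq1 seq2 dp fuel (i-1) (j-1) (a1 ++ [seq1.getD (i-1) ""]) (a2 ++ [seq2.getD (j-1) ""])
      else if i > 0 ∧ pvMget dp i j = pvMget dp (i-1) j + (-1) then
        pvTraceA seq1 seq2 dp fuel (i-1) j (a1 ++ [seq1.getD (i-1) ""]) (a2 ++ ["-"])
      else
        pvTraceA seq1 seq2 dp fuel i (j-1) (a1 ++ ["-"]) (a2 ++ [seq2.getD (j-1) ""])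
    else (a1, a2)

def pvNWA (seq1 seq2 : List String) : List String × List String :=
  let m := seq1.length
  let n := seq2.length
  let dp := pvFillA seq1 seq2 m n
  let t := pvTraceA seq1 seq2 dp (m+n) m n [] []
  (t.1.reverse, t.2.reverse)

def central_star_msa (central : List String) (others : List (List String)) : List (List String) :=
  let st := others.foldl
    (fun (st : List String × List (List String)) seq =>
      let ac := st.1
      let ao := st.2
      let p := pvNWA ac seq
      if ao.length = 0 then (p.1, [p.2])
      else
        let q := pvNWA ac p.1
        let ac2 := q.1
        let newOthers := ao.foldl (fun acc old => acc ++ [(pvNWA ac2 old).2]) []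
        (ac2, newOthers ++ [(pvNWA ac2 p.2).2]))
    (central, [])
  [st.1] ++ st.2

-- ===== PORT B =====
-- B's row 0: cells (score, aligned1, aligned2) built left to right (all-gap top row)
def pvRow0B (seq2 : List String) (n : Nat) : List (Int × List String × List String) :=
  (List.range' 1 n).foldl
    (fun row j =>
      let c := row.getD (j-1) (0, [], [])
      row ++ [(c.1 + (-1), c.2.1 ++ ["-"], c.2.2 ++ [seq2.getD (j-1) ""])])
    [(0, [], [])]

-- B's row i from row i-1: each cell extends a neighbour cell's alignment (diag > up > left)
def pvRowB (seq1 seq2 : List String) (prev : List (Int × List String × List String)) (i n : Nat) :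
    List (Int × List String × List String) :=
  let x := seq1.getD (i-1) ""
  let c0 := prev.getD 0 (0, [], [])
  (List.range' 1 n).foldl
    (fun new j =>
      let y := seq2.getD (j-1) ""
      let cd := prev.getD (j-1) (0, [], [])
      let cu := prev.getD j (0, [], [])
      let cl := new.getD (j-1) (0, [], [])
      let sd := cd.1 + pvScore x y
      let su := cu.1 + (-1)
      let sl := cl.1 + (-1)
      let best := max (max sd su) sl
      new ++ [if best = sd then (best, cd.2.1 ++ [x], cd.2.2 ++ [y])
              else if best = su then (best, cu.2.1 ++ [x], cu.2.2 ++ ["-"])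
              else (best, cl.2.1 ++ ["-"], cl.2.2 ++ [y])])
    [(c0.1 + (-1), c0.2.1 ++ [x], c0.2.2 ++ ["-"])]

def pvNWB (seq1 seq2 : List String) : List String × List String :=
  let n := seq2.length
  let row := (List.range' 1 seq1.length).foldl (fun row i => pvRowB seq1 seq2 row i n) (pvRow0B seq2 n)
  let c := row.getD n (0, [], [])
  (c.2.1, c.2.2)

def central_star_msa_alt (central : List String) (others : List (List String)) : List (List String) :=
  let st := others.foldl
    (fun (st : List String × List (List String)) seq =>
      let ac := st.1
      let ao := st.2
      let p := pvNWB ac seq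
      if ao = [] then (p.1, [p.2])
      else
        let ac2 := (pvNWB ac p.1).1
        (ac2, (ao.map (fun old => (pvNWB ac2 old).2)) ++ [(pvNWB ac2 p.2).2]))
    (central, [])
  st.1 :: st.2

-- ===== PRECONDITION & SPEC =====
def Spec_central_star_msa (central : List String) (others : List (List String)) (out : List (List String)) : Prop := out = central_star_msa_alt central others
instance (central : List String) (others : List (List String)) (out : List (List String)) : Decidable (Spec_central_star_msa central others out) := by unfold Spec_central_star_msa; infer_instance

-- ===== CLAIM (what is proved, stated in full; the proofs are below) =====
def Claim_equal_central_star_msa : Prop := ∀ (central : List String) (others : List (List String)), Dom_central_star_msa central others → Spec_central_star_msa central others (central_star_msa central others)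

-- ===== LEMMAS AND PROOFS =====

-- mathematical value of dp[i][j] (proof layer only)
def pvDpV (seq1 seq2 : List String) : Nat → Nat → Int
  | 0, j => -(j : Int)
  | i+1, 0 => -((i : Int) + 1)
  | i+1, j+1 =>
      max (max (pvDpV seq1 seq2 i j + pvScore (seq1.getD i "") (seq2.getD j ""))
               (pvDpV seq1 seq2 i (j+1) + (-1)))
          (pvDpV seq1 seq2 (i+1) j + (-1))
  termination_by i j => (i, j)

-- the canonical alignment of the length-i / length-j prefixes (fuel ≥ i+j suffices)
def pvAlV (seq1 seq2 : List String) : Nat → Nat → Nat → List String × List String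
  | 0, _, _ => ([], [])
  | fuel+1, i, j =>
    if i = 0 ∧ j = 0 then ([], [])
    else if i ≠ 0 ∧ j ≠ 0 ∧ pvDpV seq1 seq2 i j = pvDpV seq1 seq2 (i-1) (j-1) + pvScore (seq1.getD (i-1) "") (seq2.getD (j-1) "") then
      let p := pvAlV seq1 seq2 fuel (i-1) (j-1)
      (p.1 ++ [seq1.getD (i-1) ""], p.2 ++ [seq2.getD (j-1) ""])
    else if i ≠ 0 ∧ pvDpV seq1 seq2 i j = pvDpV seq1 seq2 (i-1) j + (-1) then
      let p := pvAlV seq1 seq2 fuel (i-1) j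
      (p.1 ++ [seq1.getD (i-1) ""], p.2 ++ ["-"])
    else
      let p := pvAlV seq1 seq2 fuel i (j-1)
      (p.1 ++ ["-"], p.2 ++ [seq2.getD (j-1) ""])

def pvCellV (seq1 seq2 : List String) (i j : Nat) : Int × List String × List String :=
  (pvDpV seq1 seq2 i j, pvAlV seq1 seq2 (i+j) i j)

lemma pv_getD_map_range {α : Type} (f : Nat → α) (d : α) (n j : Nat) (h : j < n) :
    ((List.range n).map f).getD j d = f j := by
  have hlen : j < ((List.range n).map f).length := by simpa using h
  rw [List.getD_eq_getElem _ _ hlen]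
  simp

lemma pvDpV_border0 (seq1 seq2 : List String) (j : Nat) :
    pvDpV seq1 seq2 0 j = -(j : Int) := by
  cases j <;> rw [pvDpV]

lemma pvDpV_border1 (seq1 seq2 : List String) (i : Nat) :
    pvDpV seq1 seq2 i 0 = -(i : Int) := by
  cases i with
  | zero => rw [pvDpV]
  | succ k => rw [pvDpV]; push_cast; ring

lemma pvFillRowA_succ (seq1 seq2 : List String) (prev : List Int) (i n : Nat) :
    pvFillRowA seq1 seq2 prev i (n+1) =
      pvFillRowA seq1 seq2 prev i n ++
        [max (max (prev.getD n 0 + pvScore (seq1.getD (i-1) "") (seq2.getD n ""))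
                  (prev.getD (n+1) 0 + (-1)))
             ((pvFillRowA seq1 seq2 prev i n).getD n 0 + (-1))] := by
  unfold pvFillRowA
  rw [List.range'_1_concat, List.foldl_append]
  simp only [List.foldl_cons, List.foldl_nil, Nat.add_comm 1 n, Nat.add_sub_cancel]

lemma pvFillRowA_spec (seq1 seq2 : List String) (prev : List Int) (i : Nat) (hi : 1 ≤ i) :
    ∀ n, (∀ j, j ≤ n → prev.getD j 0 = pvDpV seq1 seq2 (i-1) j) →
      pvFillRowA seq1 seq2 prev i n = (List.range (n+1)).map (fun j => pvDpV seq1 seq2 i j) := by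
  obtain ⟨i, rfl⟩ : ∃ k, i = k + 1 := ⟨i - 1, by omega⟩
  intro n
  induction n with
  | zero =>
    intro _
    unfold pvFillRowA
    simp only [List.range'_zero, List.foldl_nil]
    rw [show List.range (0+1) = [0] from rfl]
    simp only [List.map_cons, List.map_nil, List.cons.injEq, and_true]
    rw [show pvDpV seq1 seq2 (i+1) 0 = -((i : Int)+1) from by rw [pvDpV]]
    push_cast
    ring
  | succ n ih =>
    intro hp
    simp only [Nat.add_sub_cancel] at hp
    rw [pvFillRowA_succ, ih (by intro j hj; simpa using hp j (by omega))]
    rw [show List.range (n+1+1) = List.range (n+1) ++ [n+1] from List.range_succ,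
      List.map_append]
    congr 1
    simp only [List.map_cons, List.map_nil, List.cons.injEq, and_true]
    rw [pv_getD_map_range _ _ _ _ (show n < n+1 by omega), hp n (by omega), hp (n+1) (by omega)]
    simp only [Nat.add_sub_cancel]
    conv_rhs => rw [pvDpV]

lemma pvFillA_spec (seq1 seq2 : List String) (n : Nat) :
    ∀ m, pvFillA seq1 seq2 m n =
      (List.range (m+1)).map (fun i => (List.range (n+1)).map (fun j => pvDpV seq1 seq2 i j)) := by
  intro m
  induction m with
  | zero =>
    unfold pvFillA
    simp only [List.range'_zero, List.foldl_nil]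
    rw [show List.range (0+1) = [0] from rfl]
    simp only [List.map_cons, List.map_nil, List.cons.injEq, and_true]
    refine List.ext_getElem (by simp) ?_
    intro j h1 h2
    simp only [List.getElem_map, List.getElem_range]
    rw [pvDpV_border0]
    ring
  | succ m ih =>
    have step : pvFillA seq1 seq2 (m+1) n =
        pvFillA seq1 seq2 m n ++
          [pvFillRowA seq1 seq2 ((pvFillA seq1 seq2 m n).getD m []) (m+1) n] := by
      unfold pvFillA
      rw [List.range'_1_concat, List.foldl_append]
      simp only [List.foldl_cons, List.foldl_nil, Nat.add_comm 1 m, Nat.add_sub_cancel]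
    rw [step, ih]
    have hprev : ((List.range (m+1)).map
        (fun i => (List.range (n+1)).map (fun j => pvDpV seq1 seq2 i j))).getD m [] =
        (List.range (n+1)).map (fun j => pvDpV seq1 seq2 m j) :=
      pv_getD_map_range _ _ _ _ (by omega)
    rw [hprev, pvFillRowA_spec seq1 seq2 _ (m+1) (by omega) n
      (by intro j hj
          simpa using pv_getD_map_range (fun j => pvDpV seq1 seq2 m j) 0 (n+1) j (by omega))]
    rw [show List.range (m+1+1) = List.range (m+1) ++ [m+1] from List.range_succ]
    simp

lemma pvMget_spec (seq1 seq2 : List String) (m n i j : Nat) (hi : i ≤ m) (hj : j ≤ n) :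
    pvMget (pvFillA seq1 seq2 m n) i j = pvDpV seq1 seq2 i j := by
  unfold pvMget
  rw [pvFillA_spec, pv_getD_map_range _ _ _ _ (by omega),
    pv_getD_map_range _ _ _ _ (by omega)]

-- pvAlV is fuel-invariant above i + j
lemma pvAlV_fuel (seq1 seq2 : List String) :
    ∀ fuel f' i j, i + j ≤ fuel → i + j ≤ f' →
      pvAlV seq1 seq2 fuel i j = pvAlV seq1 seq2 f' i j := by
  intro fuel
  induction fuel with
  | zero =>
    intro f' i j h1 h2
    obtain ⟨rfl, rfl⟩ : i = 0 ∧ j = 0 := by omega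
    cases f' with
    | zero => rfl
    | succ k => rw [pvAlV, pvAlV, if_pos ⟨rfl, rfl⟩]
  | succ fuel ih =>
    intro f' i j h1 h2
    by_cases h0 : i = 0 ∧ j = 0
    · obtain ⟨rfl, rfl⟩ := h0
      cases f' with
      | zero => rw [pvAlV, pvAlV, if_pos ⟨rfl, rfl⟩]
      | succ k => rw [pvAlV, pvAlV, if_pos ⟨rfl, rfl⟩, if_pos ⟨rfl, rfl⟩]
    · obtain ⟨f'', rfl⟩ : ∃ t, f' = t + 1 := ⟨f' - 1, by omega⟩
      rw [pvAlV, pvAlV, if_neg h0, if_neg h0]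
      by_cases hd : i ≠ 0 ∧ j ≠ 0 ∧ pvDpV seq1 seq2 i j =
          pvDpV seq1 seq2 (i-1) (j-1) + pvScore (seq1.getD (i-1) "") (seq2.getD (j-1) "")
      · rw [if_pos hd, if_pos hd, ih f'' (i-1) (j-1) (by omega) (by omega)]
      · rw [if_neg hd, if_neg hd]
        by_cases hu : i ≠ 0 ∧ pvDpV seq1 seq2 i j = pvDpV seq1 seq2 (i-1) j + (-1)
        · rw [if_pos hu, if_pos hu, ih f'' (i-1) j (by omega) (by omega)]
        · rw [if_neg hu, if_neg hu]
          have hj : j ≠ 0 := by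
            intro hj0
            subst hj0
            have hi : i ≠ 0 := by omega
            exact hu ⟨hi, by
              rw [pvDpV_border1, pvDpV_border1]
              have : ((i-1 : Nat) : Int) = (i : Int) - 1 := by omega
              rw [this]; ring⟩
          rw [ih f'' i (j-1) (by omega) (by omega)]

-- A's traceback from (i,j) appends the reverse of the canonical alignment
lemma pvTraceA_alV (seq1 seq2 : List String) (m n : Nat) :
    ∀ fuel i j a1 a2, i ≤ m → j ≤ n → i + j ≤ fuel →
      pvTraceA seq1 seq2 (pvFillA seq1 seq2 m n) fuel i j a1 a2 =
        (a1 ++ (pvAlV seq1 seq2 (i+j) i j).1.reverse,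
         a2 ++ (pvAlV seq1 seq2 (i+j) i j).2.reverse) := by
  intro fuel
  induction fuel with
  | zero =>
    intro i j a1 a2 _ _ hf
    obtain ⟨rfl, rfl⟩ : i = 0 ∧ j = 0 := by omega
    rw [pvTraceA]
    simp [pvAlV]
  | succ fuel ih =>
    intro i j a1 a2 hi hj hf
    rw [pvTraceA]
    by_cases hij : i > 0 ∨ j > 0
    · rw [if_pos hij]
      have h0 : ¬(i = 0 ∧ j = 0) := by omega
      obtain ⟨k, hk⟩ : ∃ t, i + j = t + 1 := ⟨i + j - 1, by omega⟩
      rw [hk, pvAlV, if_neg h0]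
      rw [pvMget_spec seq1 seq2 m n i j hi hj,
        pvMget_spec seq1 seq2 m n (i-1) (j-1) (by omega) (by omega),
        pvMget_spec seq1 seq2 m n (i-1) j (by omega) hj]
      by_cases hd : i ≠ 0 ∧ j ≠ 0 ∧ pvDpV seq1 seq2 i j =
          pvDpV seq1 seq2 (i-1) (j-1) + pvScore (seq1.getD (i-1) "") (seq2.getD (j-1) "")
      · rw [if_pos hd,
          if_pos (show i > 0 ∧ j > 0 ∧ pvDpV seq1 seq2 i j =
              pvDpV seq1 seq2 (i-1) (j-1) + pvScore (seq1.getD (i-1) "") (seq2.getD (j-1) "") from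
            ⟨by omega, by omega, hd.2.2⟩)]
        rw [ih (i-1) (j-1) _ _ (by omega) (by omega) (by omega),
          pvAlV_fuel seq1 seq2 k ((i-1)+(j-1)) (i-1) (j-1) (by omega) (by omega)]
        simp
      · rw [if_neg hd]
        have hdA : ¬(i > 0 ∧ j > 0 ∧ pvDpV seq1 seq2 i j =
            pvDpV seq1 seq2 (i-1) (j-1) + pvScore (seq1.getD (i-1) "") (seq2.getD (j-1) "")) := by
          intro hcon; exact hd ⟨by omega, by omega, hcon.2.2⟩
        rw [if_neg hdA]
        by_cases hu : i ≠ 0 ∧ pvDpV seq1 seq2 i j = pvDpV seq1 seq2 (i-1) j + (-1)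
        · rw [if_pos hu, if_pos (show i > 0 ∧ pvDpV seq1 seq2 i j =
              pvDpV seq1 seq2 (i-1) j + (-1) from ⟨by omega, hu.2⟩)]
          rw [ih (i-1) j _ _ (by omega) hj (by omega),
            pvAlV_fuel seq1 seq2 k ((i-1)+j) (i-1) j (by omega) (by omega)]
          simp
        · rw [if_neg hu]
          have huA : ¬(i > 0 ∧ pvDpV seq1 seq2 i j = pvDpV seq1 seq2 (i-1) j + (-1)) := by
            intro hcon; exact hu ⟨by omega, hcon.2⟩
          rw [if_neg huA]
          have hjne : j ≠ 0 := by
            intro hj0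
            subst hj0
            have hine : i ≠ 0 := by omega
            exact hu ⟨hine, by
              rw [pvDpV_border1, pvDpV_border1]
              have : ((i-1 : Nat) : Int) = (i : Int) - 1 := by omega
              rw [this]; ring⟩
          rw [ih i (j-1) _ _ hi (by omega) (by omega),
            pvAlV_fuel seq1 seq2 k (i+(j-1)) i (j-1) (by omega) (by omega)]
          simp
    · rw [if_neg hij]
      obtain ⟨rfl, rfl⟩ : i = 0 ∧ j = 0 := by omega
      simp [pvAlV]

-- B's row 0 consists of the canonical cells of row 0
lemma pvRow0B_spec (seq1 seq2 : List String) :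
    ∀ n, pvRow0B seq2 n = (List.range (n+1)).map (fun j => pvCellV seq1 seq2 0 j) := by
  intro n
  induction n with
  | zero =>
    unfold pvRow0B
    simp only [List.range'_zero, List.foldl_nil]
    rw [show List.range (0+1) = [0] from rfl]
    simp [pvCellV, pvAlV, pvDpV_border0]
  | succ n ih =>
    have step : pvRow0B seq2 (n+1) =
        pvRow0B seq2 n ++
          [let c := (pvRow0B seq2 n).getD n (0, [], [])
           (c.1 + (-1), c.2.1 ++ ["-"], c.2.2 ++ [seq2.getD n ""])] := by
      unfold pvRow0B
      rw [List.range'_1_concat, List.foldl_append]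
      simp only [List.foldl_cons, List.foldl_nil, Nat.add_comm 1 n, Nat.add_sub_cancel]
    rw [step, ih,
      pv_getD_map_range (fun j => pvCellV seq1 seq2 0 j) (0, [], []) (n+1) n (by omega)]
    rw [show List.range (n+1+1) = List.range (n+1) ++ [n+1] from List.range_succ, List.map_append]
    congr 1
    simp only [List.map_cons, List.map_nil, List.cons.injEq, and_true]
    unfold pvCellV
    rw [show (0:Nat) + (n+1) = (0+n) + 1 from rfl, pvAlV]
    simp only [Nat.add_sub_cancel]
    rw [if_neg (show ¬(True ∧ n + 1 = 0) from by simp),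
      if_neg (show ¬((0:ℕ) ≠ 0 ∧ n + 1 ≠ 0 ∧ pvDpV seq1 seq2 0 (n+1) =
          pvDpV seq1 seq2 (0-1) n + pvScore (seq1.getD (0-1) "") (seq2.getD n "")) from
        fun h => h.1 rfl),
      if_neg (show ¬((0:ℕ) ≠ 0 ∧ pvDpV seq1 seq2 0 (n+1) =
          pvDpV seq1 seq2 (0-1) (n+1) + (-1)) from fun h => h.1 rfl)]
    refine Prod.ext ?_ rfl
    simp only [pvDpV_border0]
    push_cast
    ring

-- B's row i from row i-1 consists of the canonical cells of row i
lemma pvRowB_spec (seq1 seq2 : List String) (i : Nat) (hi : 1 ≤ i) :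
    ∀ n (prev : List (Int × List String × List String)),
      (∀ j, j ≤ n → prev.getD j (0, [], []) = pvCellV seq1 seq2 (i-1) j) →
      pvRowB seq1 seq2 prev i n = (List.range (n+1)).map (fun j => pvCellV seq1 seq2 i j) := by
  obtain ⟨k, rfl⟩ : ∃ k, i = k + 1 := ⟨i - 1, by omega⟩
  have hup0 : pvDpV seq1 seq2 (k+1) 0 = pvDpV seq1 seq2 (k+1-1) 0 + (-1) := by
    simp only [Nat.add_sub_cancel]
    rw [pvDpV_border1, pvDpV_border1]
    push_cast
    ring
  intro n
  induction n with
  | zero =>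
    intro prev hp
    unfold pvRowB
    simp only [List.range'_zero, List.foldl_nil, Nat.add_sub_cancel]
    rw [hp 0 (by omega)]
    rw [show List.range (0+1) = [0] from rfl]
    simp only [List.map_cons, List.map_nil, List.cons.injEq, and_true]
    unfold pvCellV
    rw [show (k+1) + 0 = k + 1 from rfl, pvAlV]
    simp only [Nat.add_sub_cancel]
    clear hp
    split_ifs <;>
      first
        | (refine Prod.ext ?_ rfl
           simp only [pvDpV_border1]
           push_cast
           ring)
        | simp_all
  | succ n ih =>
    intro prev hp
    have step : pvRowB seq1 seq2 prev (k+1) (n+1) =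
        pvRowB seq1 seq2 prev (k+1) n ++
          [let x := seq1.getD k ""
           let y := seq2.getD n ""
           let cd := prev.getD n (0, [], [])
           let cu := prev.getD (n+1) (0, [], [])
           let cl := (pvRowB seq1 seq2 prev (k+1) n).getD n (0, [], [])
           let sd := cd.1 + pvScore x y
           let su := cu.1 + (-1)
           let sl := cl.1 + (-1)
           let best := max (max sd su) sl
           if best = sd then (best, cd.2.1 ++ [x], cd.2.2 ++ [y])
           else if best = su then (best, cu.2.1 ++ [x], cu.2.2 ++ ["-"])
           else (best, cl.2.1 ++ ["-"], cl.2.2 ++ [y])] := by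
      unfold pvRowB
      rw [List.range'_1_concat, List.foldl_append]
      simp only [List.foldl_cons, List.foldl_nil, Nat.add_comm 1 n, Nat.add_sub_cancel]
    rw [step, ih prev (by intro j hj; exact hp j (by omega))]
    rw [show List.range (n+1+1) = List.range (n+1) ++ [n+1] from List.range_succ, List.map_append]
    congr 1
    simp only [List.map_cons, List.map_nil, List.cons.injEq, and_true]
    rw [pv_getD_map_range (fun j => pvCellV seq1 seq2 (k+1) j) (0, [], []) (n+1) n (by omega),
      hp n (by omega), hp (n+1) (by omega)]
    simp only [pvCellV, Nat.add_sub_cancel]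
    have hbest :
        max (max (pvDpV seq1 seq2 k n + pvScore (seq1.getD k "") (seq2.getD n ""))
                 (pvDpV seq1 seq2 k (n+1) + (-1)))
            (pvDpV seq1 seq2 (k+1) n + (-1)) = pvDpV seq1 seq2 (k+1) (n+1) := by
      conv_rhs => rw [pvDpV]
    rw [hbest]
    rw [show (k+1) + (n+1) = ((k+1) + n) + 1 from rfl, pvAlV]
    simp only [Nat.add_sub_cancel]
    rw [pvAlV_fuel seq1 seq2 ((k+1)+n) (k+n) k n (by omega) (by omega),
      pvAlV_fuel seq1 seq2 ((k+1)+n) (k+(n+1)) k (n+1) (by omega) (by omega)]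
    clear step ih hp hup0
    split_ifs <;>
      first
        | rfl
        | simp_all

-- B's final row after folding all rows
lemma pvRowsB_spec (seq1 seq2 : List String) (n : Nat) :
    ∀ m, (List.range' 1 m).foldl (fun row i => pvRowB seq1 seq2 row i n) (pvRow0B seq2 n) =
      (List.range (n+1)).map (fun j => pvCellV seq1 seq2 m j) := by
  intro m
  induction m with
  | zero =>
    simp only [List.range'_zero, List.foldl_nil]
    exact pvRow0B_spec seq1 seq2 n
  | succ m ih =>
    rw [List.range'_1_concat, List.foldl_append]
    simp only [List.foldl_cons, List.foldl_nil, Nat.add_comm 1 m]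
    rw [ih, pvRowB_spec seq1 seq2 (m+1) (by omega) n _
      (by
        intro j hj
        simp only [Nat.add_sub_cancel]
        exact pv_getD_map_range (fun j => pvCellV seq1 seq2 m j) (0, [], []) (n+1) j (by omega))]

lemma pvNW_eq (seq1 seq2 : List String) : pvNWB seq1 seq2 = pvNWA seq1 seq2 := by
  unfold pvNWA pvNWB
  simp only []
  rw [pvTraceA_alV seq1 seq2 seq1.length seq2.length (seq1.length + seq2.length)
    seq1.length seq2.length [] [] (le_refl _) (le_refl _) (le_refl _)]
  rw [pvRowsB_spec seq1 seq2 seq2.length seq1.length,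
    pv_getD_map_range (fun j => pvCellV seq1 seq2 seq1.length j) (0, [], [])
      (seq2.length+1) seq2.length (by omega)]
  simp [pvCellV]

lemma pv_foldl_append_map {α β : Type} (g : α → β) :
    ∀ (l : List α) (acc : List β), l.foldl (fun acc x => acc ++ [g x]) acc = acc ++ l.map g := by
  intro l
  induction l with
  | nil => intro acc; simp
  | cons x xs ih => intro acc; simp [ih]

-- ===== VERDICT (by name: the statement is the Claim_ definition above) =====
theorem central_star_msa_spec : Claim_equal_central_star_msa := by
  unfold Claim_equal_central_star_msa
  intro central others _
  unfold Spec_central_star_msa central_star_msa central_star_msa_alt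
  have hstep : (fun (st : List String × List (List String)) seq =>
      let ac := st.1
      let ao := st.2
      let p := pvNWA ac seq
      if ao.length = 0 then (p.1, [p.2])
      else
        let q := pvNWA ac p.1
        let ac2 := q.1
        let newOthers := ao.foldl (fun acc old => acc ++ [(pvNWA ac2 old).2]) []
        (ac2, newOthers ++ [(pvNWA ac2 p.2).2])) =
    (fun (st : List String × List (List String)) seq =>
      let ac := st.1
      let ao := st.2
      let p := pvNWB ac seq
      if ao = [] then (p.1, [p.2])
      else
        let ac2 := (pvNWB ac p.1).1
        (ac2, (ao.map (fun old => (pvNWB ac2 old).2)) ++ [(pvNWB ac2 p.2).2])) := by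
    funext st seq
    simp only [pvNW_eq, List.length_eq_zero_iff, pv_foldl_append_map, List.nil_append]
  rw [hstep]
  simp
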